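-- pv_equiv track=rewrite | github.com/JanBanasik/Leetcode | 2554-minimum-total-distance-traveled/2554-minimum-total-distance-traveled.py | minimumTotalDistance
-- ===== SOURCE A (Python) =====
-- from typing import List
--
-- def minimumTotalDistance(robot: List[int], factory: List[List[int]]) -> int:
--     robot.sort()
--     factory.sort(key = lambda x: x[0])
--     pos = []
--     for i in factory:
--         for _ in range(i[1]):
--             pos.append(i[0])
--     cost = 0
--     m = len(robot)
--     n = len(pos)
--     dp = [[0 for _ in range(n + 1)] for i in range(m + 1)]
--
--     for i in range(m):
--         dp[i][n] = float('inf')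
--
--     for i in range(m - 1, -1, -1):
--         for j in range(n - 1, -1, -1):
--             assign = abs(robot[i] - pos[j]) + dp[i + 1][j + 1]
--             skip = dp[i][j + 1]
--             dp[i][j] = min(assign, skip)
--     return dp[0][0]
-- ===== SOURCE B (Python) =====
-- from typing import List
--
-- def minimumTotalDistance(robot: List[int], factory: List[List[int]]) -> int:
--     # Factory-indexed DP (capacities capped at the robot count) instead of
--     # expanding every factory into one slot per unit of capacity.
--     robot.sort()
--     factory.sort(key=lambda x: x[0])
--     m = len(robot)
--     # dp[i] = min cost to assign robots robot[i:] to the factories processed so far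
--     dp = [float('inf')] * m + [0]
--     for fac in reversed(factory):
--         f = fac[0]
--         c = fac[1]
--         ndp = []
--         for i in range(m):
--             best = dp[i]
--             s = 0
--             for k in range(1, min(c, m - i) + 1):
--                 s += abs(robot[i + k - 1] - f)
--                 cand = dp[i + k] + s
--                 if cand < best:
--                     best = cand
--             ndp.append(best)
--         ndp.append(0)
--         dp = ndp
--     return dp[0]
-- ===== Notes on version B (the rewrite author's own statement) =====
-- stated objective: faster
-- what changed: A expands each factory into one position per unit of capacity and runs a robots-by-positions DP over the expanded list; B keeps the factories themselves, processes them in descending position order with a 1-D robots-suffix DP and an inner loop over at most min(capacity, m) robots per factory, so capacity is capped at the robot count and the expanded list never exists.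
-- outside the precondition, e.g. on minimumTotalDistance([0], [[5, 0]]): A returns inf, B returns inf
import Mathlib
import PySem

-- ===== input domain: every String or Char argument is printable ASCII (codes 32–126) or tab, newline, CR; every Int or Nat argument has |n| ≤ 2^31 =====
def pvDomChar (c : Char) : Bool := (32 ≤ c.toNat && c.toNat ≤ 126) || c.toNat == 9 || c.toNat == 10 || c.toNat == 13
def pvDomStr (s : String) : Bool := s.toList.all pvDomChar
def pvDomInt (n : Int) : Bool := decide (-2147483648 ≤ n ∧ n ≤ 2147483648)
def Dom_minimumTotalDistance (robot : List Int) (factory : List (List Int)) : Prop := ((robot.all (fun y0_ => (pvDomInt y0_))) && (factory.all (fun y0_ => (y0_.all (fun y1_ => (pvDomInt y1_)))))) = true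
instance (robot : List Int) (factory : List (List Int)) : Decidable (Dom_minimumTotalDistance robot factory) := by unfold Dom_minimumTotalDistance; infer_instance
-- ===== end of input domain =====

-- B replaces A's robots-by-expanded-positions DP (one slot per unit of factory
-- capacity) with a factory-indexed 1-D DP whose per-factory inner loop is capped
-- at min(capacity, number of robots); objective: faster when capacities are large.
-- Like A, B sorts `robot` and `factory` in place; the theorems are about the
-- return value (both implementations perform the same mutation).
-- Python's float('inf') entries of the DP tables are modelled as ⊤ : WithTop Int
-- (min and (+ finite int) behave exactly as in Python).

-- ===== PORT A =====
-- Python's min / < on DP values (ints and float('inf') = ⊤), with an explicitly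
-- computable Decidable instance (the LinearOrder one is noncomputable):
def pvMin (a b : WithTop Int) : WithTop Int := @ite _ (a ≤ b) (WithTop.decidableLE a b) a b
def pvLt (a b : WithTop Int) : Bool := @decide (a < b) (WithTop.decidableLT a b)

-- dp[i][j] access / in-place update of the 2-D table (list of rows)
def pvTGet (dp : List (List (WithTop Int))) (i j : Nat) : WithTop Int := (dp.getD i []).getD j 0
def pvTSet (dp : List (List (WithTop Int))) (i j : Nat) (v : WithTop Int) : List (List (WithTop Int)) :=
  dp.set i ((dp.getD i []).set j v)

-- `for i in range(m): dp[i][n] = float('inf')` (ascending i; fuel t = rows 0..t-1 done)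
def pvAInit (n : Nat) : Nat → List (List (WithTop Int)) → List (List (WithTop Int))
  | 0, dp => dp
  | t+1, dp => pvTSet (pvAInit n t dp) t n ⊤

-- inner `for j in range(n-1, -1, -1)` for row i; fuel t+1 processes j = t first, then t-1, …, 0
def pvARow (r pos : List Int) (i : Nat) : Nat → List (List (WithTop Int)) → List (List (WithTop Int))
  | 0, dp => dp
  | t+1, dp =>
      let assign := ((|r.getD i 0 - pos.getD t 0| : Int) : WithTop Int) + pvTGet dp (i+1) (t+1)
      let skip := pvTGet dp i (t+1)
      pvARow r pos i t (pvTSet dp i t (pvMin assign skip))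

-- outer `for i in range(m-1, -1, -1)`; fuel t+1 processes row i = t first, then t-1, …, 0
def pvARows (r pos : List Int) (n : Nat) : Nat → List (List (WithTop Int)) → List (List (WithTop Int))
  | 0, dp => dp
  | t+1, dp => pvARows r pos n t (pvARow r pos t n dp)

def minimumTotalDistance (robot : List Int) (factory : List (List Int)) : Int :=
  let r := PySem.List.sorted robot (fun x => x) false
  let fs := PySem.List.sorted factory (fun x => PySem.List.pyGetD x 0 0) false
  -- `for i in factory: for _ in range(i[1]): pos.append(i[0])`
  let pos := fs.foldl (fun acc i =>
    acc ++ List.replicate (PySem.List.pyGetD i 1 0).toNat (PySem.List.pyGetD i 0 0)) []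
  let m := r.length
  let n := pos.length
  let dp0 : List (List (WithTop Int)) := List.replicate (m+1) (List.replicate (n+1) (0 : WithTop Int))
  let dp1 := pvAInit n m dp0
  let dp2 := pvARows r pos n m dp1
  WithTop.untopD 0 (pvTGet dp2 0 0)   -- `return dp[0][0]` (an int whenever Pre_ holds)

-- ===== PORT B =====
-- inner `for k in range(1, min(c, m-i)+1)` : state (best, s); fuel t = iterations k = 1..t done
def pvBInner (r : List Int) (dp : List (WithTop Int)) (f : Int) (i : Nat) : Nat → WithTop Int × Int
  | 0 => (dp.getD i 0, 0)
  | t+1 =>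
      let p := pvBInner r dp f i t
      let s := p.2 + |r.getD (i+t) 0 - f|
      let cand := dp.getD (i+t+1) 0 + ((s : Int) : WithTop Int)
      (if pvLt cand p.1 then cand else p.1, s)

-- one factory: build ndp (`for i in range(m): … ndp.append(best)` then `ndp.append(0)`)
def pvBStep (r : List Int) (m : Nat) (dp : List (WithTop Int)) (fac : List Int) : List (WithTop Int) :=
  let f := PySem.List.pyGetD fac 0 0
  let c := PySem.List.pyGetD fac 1 0
  ((List.range m).map (fun i => (pvBInner r dp f i (min c ((m - i : Nat) : Int)).toNat).1)) ++ [0]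

def minimumTotalDistance_alt (robot : List Int) (factory : List (List Int)) : Int :=
  let r := PySem.List.sorted robot (fun x => x) false
  let fs := PySem.List.sorted factory (fun x => PySem.List.pyGetD x 0 0) false
  let m := r.length
  -- `dp = [float('inf')] * m + [0]`, then `for fac in reversed(factory): dp = …`
  let dp := fs.reverse.foldl (pvBStep r m) (List.replicate m (⊤ : WithTop Int) ++ [0])
  WithTop.untopD 0 (dp.getD 0 0)   -- `return dp[0]`

-- ===== PRECONDITION & SPEC =====
-- Pre_ excludes factory entries with fewer than 2 elements (A raises IndexError in the
-- sort key or on i[1]) and inputs whose total capacity is below the robot count (A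
-- returns float('inf') there, which is not an int).
def Pre_minimumTotalDistance (robot : List Int) (factory : List (List Int)) : Prop :=
  (∀ f ∈ factory, 2 ≤ f.length) ∧
  robot.length ≤ (factory.map (fun f => (f.getD 1 0).toNat)).sum
instance (robot : List Int) (factory : List (List Int)) : Decidable (Pre_minimumTotalDistance robot factory) := by
  unfold Pre_minimumTotalDistance; infer_instance

def pvWitness_minimumTotalDistance : List Int × List (List Int) := ([0], [[1, 1]])

def Spec_minimumTotalDistance (robot : List Int) (factory : List (List Int)) (out : Int) : Prop := out = minimumTotalDistance_alt robot factory
instance (robot : List Int) (factory : List (List Int)) (out : Int) : Decidable (Spec_minimumTotalDistance robot factory out) := by unfold Spec_minimumTotalDistance; infer_instance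

-- ===== CLAIM (what is proved, stated in full; the proofs are below) =====
def Claim_equal_minimumTotalDistance : Prop := ∀ (robot : List Int) (factory : List (List Int)), Dom_minimumTotalDistance robot factory → Pre_minimumTotalDistance robot factory → Spec_minimumTotalDistance robot factory (minimumTotalDistance robot factory)

-- ===== LEMMAS AND PROOFS =====

-- The common mathematical value: pvF rl pl = min cost of assigning ALL robots rl to a
-- subsequence of the position multiset pl (⊤ = impossible / Python's float('inf')).
def pvF : List Int → List Int → WithTop Int
  | [], _ => 0
  | _ :: _, [] => ⊤
  | a :: rl, b :: pl => min (((|a - b| : Int) : WithTop Int) + pvF rl pl) (pvF (a :: rl) pl)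
  termination_by rl pl => pl.length + rl.length

@[simp] lemma pvF_nil_left (pl : List Int) : pvF [] pl = 0 := by cases pl <;> simp [pvF]
@[simp] lemma pvF_cons_nil (a : Int) (rl : List Int) : pvF (a :: rl) [] = ⊤ := by simp [pvF]
lemma pvF_cons_cons (a b : Int) (rl pl : List Int) :
    pvF (a :: rl) (b :: pl) = min (((|a - b| : Int) : WithTop Int) + pvF rl pl) (pvF (a :: rl) pl) := by
  simp [pvF]

lemma pvMin_eq_min (a b : WithTop Int) : pvMin a b = min a b := by rw [pvMin, min_def]
lemma pvLt_iff (a b : WithTop Int) : pvLt a b = decide (a < b) := by rw [pvLt]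

-- running minimum of term 0, …, term K
def pvMko (term : Nat → WithTop Int) : Nat → WithTop Int
  | 0 => term 0
  | k+1 => min (pvMko term k) (term (k+1))

-- prefix cost: Σ_{u<k} |rl[u] - b|
def pvS (rl : List Int) (b : Int) (k : Nat) : Int := ((rl.take k).map (fun x => |x - b|)).sum

lemma pv_add_min (a b c : WithTop Int) : a + min b c = min (a + b) (a + c) := by
  rcases le_total b c with h | h
  · rw [min_eq_left h, min_eq_left (by gcongr)]
  · rw [min_eq_right h, min_eq_right (by gcongr)]

lemma pvMko_le (t : Nat → WithTop Int) {k K : Nat} (h : k ≤ K) : pvMko t K ≤ t k := by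
  induction K with
  | zero => simp_all [pvMko]
  | succ K ih =>
      rcases Nat.lt_or_ge k (K+1) with hk | hk
      · exact le_trans (min_le_left _ _) (ih (by omega))
      · have : k = K+1 := by omega
        subst this; exact min_le_right _ _

lemma le_pvMko (t : Nat → WithTop Int) {x : WithTop Int} {K : Nat} (h : ∀ k ≤ K, x ≤ t k) : x ≤ pvMko t K := by
  induction K with
  | zero => exact h 0 le_rfl
  | succ K ih => exact le_min (ih fun k hk => h k (by omega)) (h (K+1) le_rfl)

lemma pvMko_congr {t t' : Nat → WithTop Int} {K : Nat} (h : ∀ k ≤ K, t k = t' k) : pvMko t K = pvMko t' K := by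
  induction K with
  | zero => simpa [pvMko] using h 0 le_rfl
  | succ K ih => simp [pvMko, ih fun k hk => h k (by omega), h (K+1) le_rfl]

lemma pv_add_pvMko (a : WithTop Int) (t : Nat → WithTop Int) (K : Nat) :
    a + pvMko t K = pvMko (fun k => a + t k) K := by
  induction K with
  | zero => rfl
  | succ K ih => simp [pvMko, pv_add_min, ih]

@[simp] lemma pvS_zero (rl : List Int) (b : Int) : pvS rl b 0 = 0 := rfl

lemma pvS_cons_succ (a : Int) (rl : List Int) (b : Int) (k : Nat) :
    pvS (a :: rl) b (k+1) = |a - b| + pvS rl b k := by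
  simp [pvS]

lemma pvS_succ {rl : List Int} (b : Int) {t : Nat} (h : t < rl.length) :
    pvS rl b (t+1) = pvS rl b t + |rl[t] - b| := by
  simp only [pvS]
  rw [List.map_take, List.map_take, List.take_add_one, List.getElem?_eq_getElem (by simpa using h)]
  simp

-- grouping: the DP over c identical positions b equals a single min over how many
-- of the first robots go to that factory (capped at min c (number of robots))
lemma pvF_replicate (c : Nat) (rl pl : List Int) (b : Int) :
    pvF rl (List.replicate c b ++ pl) =
      pvMko (fun k => ((pvS rl b k : Int) : WithTop Int) + pvF (rl.drop k) pl) (min c rl.length) := by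
  induction c generalizing rl with
  | zero => simp [pvMko]
  | succ c ih =>
    cases rl with
    | nil => simp [pvMko]
    | cons a rl' =>
      rw [List.replicate_succ, List.cons_append, pvF_cons_cons, ih rl', ih (a :: rl')]
      have hshift : ∀ k : Nat,
          ((|a - b| : Int) : WithTop Int) + (((pvS rl' b k : Int) : WithTop Int) + pvF (rl'.drop k) pl)
            = ((pvS (a :: rl') b (k+1) : Int) : WithTop Int) + pvF ((a :: rl').drop (k+1)) pl := by
        intro k
        simp [pvS_cons_succ, add_assoc]
      have hJ : min (c+1) ((a :: rl').length) = min c rl'.length + 1 := by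
        simp [Nat.succ_min_succ]
      rw [hJ]
      apply le_antisymm
      · apply le_pvMko
        intro k hk
        match k with
        | 0 =>
            exact le_trans (min_le_right _ _) (pvMko_le _ (Nat.zero_le _))
        | (k'+1) =>
            refine le_trans (min_le_left _ _) ?_
            rw [← hshift k']
            have h1 : pvMko (fun k => ((pvS rl' b k : Int) : WithTop Int) + pvF (rl'.drop k) pl) (min c rl'.length)
                ≤ ((pvS rl' b k' : Int) : WithTop Int) + pvF (rl'.drop k') pl := pvMko_le _ (by omega)
            calc ((|a - b| : Int) : WithTop Int) + pvMko (fun k => ((pvS rl' b k : Int) : WithTop Int) + pvF (rl'.drop k) pl) (min c rl'.length)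
                ≤ ((|a - b| : Int) : WithTop Int) + (((pvS rl' b k' : Int) : WithTop Int) + pvF (rl'.drop k') pl) := by gcongr
              _ = _ := rfl
      · apply le_min
        · rw [pv_add_pvMko]
          apply le_pvMko
          intro k hk
          rw [hshift k]
          exact pvMko_le _ (by omega)
        · apply le_pvMko
          intro k hk
          exact pvMko_le _ (by omega)

-- ============ A-side: the table loops compute pvF ============
def pvShape (dp : List (List (WithTop Int))) (m n : Nat) : Prop :=
  dp.length = m+1 ∧ ∀ i, i ≤ m → (dp.getD i []).length = n+1

lemma pv_getD_set {α : Type} [Inhabited α] (l : List α) (i j : Nat) (x d : α) :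
    (l.set i x).getD j d = if j = i ∧ i < l.length then x else l.getD j d := by
  simp [List.getD, List.getElem?_set]; split_ifs <;> simp_all

lemma pvTGet_pvTSet (dp : List (List (WithTop Int))) {m n : Nat} (hs : pvShape dp m n)
    {i j : Nat} (hi : i ≤ m) (hj : j ≤ n) (v : WithTop Int) (i' j' : Nat) :
    pvTGet (pvTSet dp i j v) i' j' = if i' = i ∧ j' = j then v else pvTGet dp i' j' := by
  obtain ⟨hlen, hrow⟩ := hs
  have hi2 : i < dp.length := by omega
  have hj2 : j < (dp.getD i []).length := by rw [hrow i hi]; omega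
  by_cases h1 : i' = i
  · subst h1
    have hj3 : j' ≤ n → j' < dp[i'].length := fun _ => by
      have := hrow i' hi
      simp only [List.getD, List.getElem?_eq_getElem hi2, Option.getD_some] at this ⊢
      omega
    by_cases h2 : j' = j
    · subst h2
      simp [pvTGet, pvTSet, hi2, hj3 hj]
    · simp [pvTGet, pvTSet, hi2, show j ≠ j' from fun h => h2 h.symm]
      exact fun h => absurd h h2
  · simp [pvTGet, pvTSet, show i ≠ i' from fun h => h1 h.symm]
    exact fun h _ => absurd h h1

lemma pvShape_pvTSet (dp : List (List (WithTop Int))) {m n : Nat} (hs : pvShape dp m n)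
    (i j : Nat) (v : WithTop Int) : pvShape (pvTSet dp i j v) m n := by
  obtain ⟨hlen, hrow⟩ := hs
  refine ⟨by simp [pvTSet, hlen], ?_⟩
  intro i' hi'
  rw [pvTSet, pv_getD_set]
  split_ifs with h
  · have hh := hrow i (by omega)
    simpa [List.length_set, List.getD] using hh
  · exact hrow i' hi'

lemma pvAInit_spec (m n : Nat) : ∀ t (dp : List (List (WithTop Int))), t ≤ m → pvShape dp m n →
    pvShape (pvAInit n t dp) m n ∧
    ∀ i j, pvTGet (pvAInit n t dp) i j = if i < t ∧ j = n then ⊤ else pvTGet dp i j := by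
  intro t
  induction t with
  | zero => intro dp _ hs; exact ⟨hs, fun i j => by simp [pvAInit]⟩
  | succ t ih =>
      intro dp ht hs
      obtain ⟨hs', hv⟩ := ih dp (by omega) hs
      refine ⟨pvShape_pvTSet _ hs' t n ⊤, ?_⟩
      intro i j
      rw [pvAInit, pvTGet_pvTSet _ hs' (by omega) (le_refl n) ⊤ i j, hv i j]
      split_ifs <;> first | rfl | omega

lemma pvARow_spec (r pos : List Int) {i : Nat} (hi : i < r.length) :
    ∀ u (dp : List (List (WithTop Int))), u ≤ pos.length → pvShape dp r.length pos.length →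
    (∀ j, j ≤ pos.length → pvTGet dp (i+1) j = pvF (r.drop (i+1)) (pos.drop j)) →
    (∀ j, u ≤ j → j ≤ pos.length → pvTGet dp i j = pvF (r.drop i) (pos.drop j)) →
    pvShape (pvARow r pos i u dp) r.length pos.length ∧
    (∀ i' j', i' ≠ i → pvTGet (pvARow r pos i u dp) i' j' = pvTGet dp i' j') ∧
    (∀ j, j ≤ pos.length → pvTGet (pvARow r pos i u dp) i j = pvF (r.drop i) (pos.drop j)) := by
  intro u
  induction u with
  | zero =>
      intro dp _ hs hrow1 hrow0
      exact ⟨hs, fun _ _ _ => rfl, fun j hj => hrow0 j (Nat.zero_le _) hj⟩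
  | succ u ih =>
      intro dp hu hs hrow1 hrow0
      have hu' : u < pos.length := by omega
      -- the value written at column u is pvF (r.drop i) (pos.drop u)
      have hval : pvMin (((|r.getD i 0 - pos.getD u 0| : Int) : WithTop Int) + pvTGet dp (i+1) (u+1)) (pvTGet dp i (u+1))
          = pvF (r.drop i) (pos.drop u) := by
        rw [hrow1 (u+1) (by omega), hrow0 (u+1) (by omega) (by omega),
            List.getD_eq_getElem r 0 hi, List.getD_eq_getElem pos 0 hu', pvMin_eq_min]
        conv_rhs => rw [List.drop_eq_getElem_cons hi, List.drop_eq_getElem_cons hu',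
          pvF_cons_cons, ← List.drop_eq_getElem_cons hi]
      have hs2 := pvShape_pvTSet dp hs i u (pvF (r.drop i) (pos.drop u))
      have step : pvARow r pos i (u+1) dp
          = pvARow r pos i u (pvTSet dp i u (pvF (r.drop i) (pos.drop u))) := by
        rw [pvARow, hval]
      rw [step]
      have htt := pvTGet_pvTSet dp hs (i := i) (j := u) (by omega) (by omega)
        (pvF (r.drop i) (pos.drop u))
      obtain ⟨hsf, hunch, hrowi⟩ := ih (pvTSet dp i u (pvF (r.drop i) (pos.drop u))) (by omega) hs2
        (fun j hj => by
          rw [htt (i+1) j]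
          simp only [show ¬((i+1) = i ∧ j = u) from by omega, if_false]
          exact hrow1 j hj)
        (fun j hju hj => by
          rw [htt i j]
          by_cases h : j = u
          · subst h; simp
          · rw [if_neg (by simp [h])]
            exact hrow0 j (by omega) hj)
      refine ⟨hsf, ?_, hrowi⟩
      intro i' j' hne
      rw [hunch i' j' hne, htt i' j']
      simp [show ¬(i' = i ∧ j' = u) from by simp [hne]]

lemma pvARows_spec (r pos : List Int) :
    ∀ t (dp : List (List (WithTop Int))), t ≤ r.length → pvShape dp r.length pos.length →
    (∀ i, t ≤ i → i ≤ r.length → ∀ j, j ≤ pos.length → pvTGet dp i j = pvF (r.drop i) (pos.drop j)) →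
    (∀ i, i < t → pvTGet dp i pos.length = ⊤) →
    ∀ i, i ≤ r.length → ∀ j, j ≤ pos.length →
      pvTGet (pvARows r pos pos.length t dp) i j = pvF (r.drop i) (pos.drop j) := by
  intro t
  induction t with
  | zero =>
      intro dp _ _ hcorr _ i hi j hj
      rw [pvARows]
      exact hcorr i (Nat.zero_le _) hi j hj
  | succ t ih =>
      intro dp ht hs hcorr htop
      rw [pvARows]
      have htm : t < r.length := by omega
      obtain ⟨hs2, hunch, hrowt⟩ := pvARow_spec r pos htm pos.length dp (le_refl _) hs
        (fun j hj => hcorr (t+1) (le_refl _) (by omega) j hj)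
        (fun j hju hj => by
          have : j = pos.length := by omega
          subst this
          rw [htop t (by omega), List.drop_length]
          conv_rhs => rw [List.drop_eq_getElem_cons htm]
          rw [pvF_cons_nil])
      exact ih (pvARow r pos t pos.length dp) (by omega) hs2
        (fun i hti hi j hj => by
          rcases Nat.eq_or_lt_of_le hti with h | h
          · subst h; exact hrowt j hj
          · rw [hunch i j (by omega)]; exact hcorr i (by omega) hi j hj)
        (fun i hit => by
          rw [hunch i pos.length (by omega)]
          exact htop i (by omega))

-- ============ B-side: the factory fold computes pvF ============
lemma pv_ite_lt_min (b c : WithTop Int) : (if pvLt c b then c else b) = min b c := by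
  rw [pvLt_iff]
  rcases le_total b c with h | h
  · simp [not_lt.mpr h, min_eq_left h]
  · rw [min_eq_right h]
    by_cases hlt : c < b
    · simp [hlt]
    · simp only [hlt, decide_false, Bool.false_eq_true, if_false]
      exact le_antisymm (not_lt.mp hlt) h

lemma pvBInner_spec (r : List Int) (P : List Int) (dp : List (WithTop Int)) (f : Int)
    (hdp : ∀ j, j ≤ r.length → dp.getD j 0 = pvF (r.drop j) P) (i : Nat) :
    ∀ t, i + t ≤ r.length →
      (pvBInner r dp f i t).1 =
        pvMko (fun k => ((pvS (r.drop i) f k : Int) : WithTop Int) + pvF (r.drop (i+k)) P) t ∧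
      (pvBInner r dp f i t).2 = pvS (r.drop i) f t := by
  intro t
  induction t with
  | zero =>
      intro h
      refine ⟨?_, rfl⟩
      rw [pvBInner, pvMko, hdp i (by omega)]
      simp
  | succ t ih =>
      intro h
      obtain ⟨ih1, ih2⟩ := ih (by omega)
      have hts : t < (r.drop i).length := by simp; omega
      have hgd : r.getD (i+t) 0 = (r.drop i)[t]'hts := by
        rw [List.getD_eq_getElem r 0 (by omega), List.getElem_drop]
      constructor
      · simp only [pvBInner]
        rw [ih2, ih1, hgd, ← pvS_succ f hts, hdp (i+t+1) (by omega), pv_ite_lt_min, pvMko]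
        congr 1
        rw [add_comm, Nat.add_assoc]
      · simp only [pvBInner]
        rw [ih2, hgd, pvS_succ f hts]

lemma pvBStep_spec (r : List Int) (P : List Int) (D : List (WithTop Int)) (fac : List Int)
    (hval : ∀ i, i ≤ r.length → D.getD i 0 = pvF (r.drop i) P) :
    (pvBStep r r.length D fac).length = r.length + 1 ∧
    ∀ i, i ≤ r.length → (pvBStep r r.length D fac).getD i 0 =
      pvF (r.drop i)
        (List.replicate (PySem.List.pyGetD fac 1 0).toNat (PySem.List.pyGetD fac 0 0) ++ P) := by
  refine ⟨by simp [pvBStep], ?_⟩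
  intro i hi
  simp only [pvBStep]
  rcases Nat.lt_or_ge i r.length with h | h
  · have hg : ∀ (g : Nat → WithTop Int), (((List.range r.length).map g) ++ [0]).getD i 0 = g i := by
      intro g
      rw [List.getD, List.getElem?_append_left (by simp [h])]
      simp [h]
    rw [hg]
    obtain ⟨h1, _⟩ := pvBInner_spec r P D (PySem.List.pyGetD fac 0 0) hval i
      ((min (PySem.List.pyGetD fac 1 0) ((r.length - i : Nat) : Int)).toNat)
      (by
        have := Int.toNat_le_toNat (min_le_right (PySem.List.pyGetD fac 1 0) ((r.length - i : Nat) : Int))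
        omega)
    rw [h1, pvF_replicate]
    rw [show (min (PySem.List.pyGetD fac 1 0) ((r.length - i : Nat) : Int)).toNat
        = min (PySem.List.pyGetD fac 1 0).toNat ((r.drop i).length) from by simp; omega]
    exact pvMko_congr (fun k hk => by rw [List.drop_drop])
  · have : i = r.length := by omega
    subst this
    rw [List.drop_length, List.getD, List.getElem?_append_right (by simp)]
    simp

lemma pvBFold_spec (r : List Int) :
    ∀ (fs : List (List Int)),
    (fs.foldr (fun fac dp => pvBStep r r.length dp fac)
        (List.replicate r.length (⊤ : WithTop Int) ++ [0])).length = r.length + 1 ∧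
    ∀ i, i ≤ r.length →
      (fs.foldr (fun fac dp => pvBStep r r.length dp fac)
        (List.replicate r.length (⊤ : WithTop Int) ++ [0])).getD i 0 =
      pvF (r.drop i)
        (fs.flatMap (fun fac => List.replicate (PySem.List.pyGetD fac 1 0).toNat (PySem.List.pyGetD fac 0 0))) := by
  intro fs
  induction fs with
  | nil =>
      refine ⟨by simp, ?_⟩
      intro i hi
      simp only [List.foldr_nil, List.flatMap_nil]
      rcases Nat.lt_or_ge i r.length with h | h
      · conv_rhs => rw [List.drop_eq_getElem_cons h]
        rw [pvF_cons_nil, List.getD, List.getElem?_append_left (by simp [h]),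
          List.getElem?_replicate]
        simp [h]
      · have : i = r.length := by omega
        subst this
        rw [List.drop_length, List.getD, List.getElem?_append_right (by simp)]
        simp
  | cons fac fs ih =>
      obtain ⟨ihlen, ihval⟩ := ih
      simp only [List.foldr_cons, List.flatMap_cons]
      exact pvBStep_spec r _ _ fac ihval

-- ============ assembly ============
lemma pv_ports_eq (robot : List Int) (factory : List (List Int)) :
    minimumTotalDistance robot factory = minimumTotalDistance_alt robot factory := by
  simp only [minimumTotalDistance, minimumTotalDistance_alt]
  set r := PySem.List.sorted robot (fun x => x) false with hr
  set fs := PySem.List.sorted factory (fun x => PySem.List.pyGetD x 0 0) false with hfs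
  set pos := fs.foldl (fun acc i =>
    acc ++ List.replicate (PySem.List.pyGetD i 1 0).toNat (PySem.List.pyGetD i 0 0)) [] with hpos
  have hposf : pos = fs.flatMap (fun fac =>
      List.replicate (PySem.List.pyGetD fac 1 0).toNat (PySem.List.pyGetD fac 0 0)) := by
    rw [hpos, PySem.List.foldl_append_eq_flatMap]
    simp
  set m := r.length with hm
  set n := pos.length with hn
  set dp0 : List (List (WithTop Int)) := List.replicate (m+1) (List.replicate (n+1) (0 : WithTop Int)) with hdp0
  have hshape0 : pvShape dp0 m n := by
    refine ⟨by simp [hdp0], ?_⟩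
    intro i hi
    rw [hdp0, List.getD, List.getElem?_replicate, if_pos (by omega)]
    simp
  have h00 : ∀ i j, pvTGet dp0 i j = 0 := by
    intro i j
    have hrow : dp0.getD i [] = if i < m+1 then List.replicate (n+1) (0 : WithTop Int) else [] := by
      rw [hdp0, List.getD, List.getElem?_replicate]
      split_ifs <;> simp
    rw [pvTGet, hrow]
    split_ifs with h
    · rw [List.getD, List.getElem?_replicate]
      split_ifs <;> simp
    · simp
  obtain ⟨hshape1, hv1⟩ := pvAInit_spec m n m dp0 (le_refl m) hshape0
  have ha : pvTGet (pvARows r pos n m (pvAInit n m dp0)) 0 0 = pvF r pos := by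
    have hfin := pvARows_spec r pos m (pvAInit n m dp0) (le_refl _) hshape1
      (fun i hmi hi j hj => by
        have hieq : i = m := le_antisymm hi hmi
        rw [hieq, hv1 m j, if_neg (by omega), h00 m j, hm, List.drop_length]
        simp)
      (fun i hit => by rw [hv1 i n, if_pos ⟨hit, rfl⟩])
      0 (Nat.zero_le _) 0 (Nat.zero_le _)
    simpa using hfin
  have hb : (fs.reverse.foldl (pvBStep r m) (List.replicate m (⊤ : WithTop Int) ++ [0])).getD 0 0
      = pvF r pos := by
    rw [List.foldl_reverse]
    obtain ⟨_, hval⟩ := pvBFold_spec r fs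
    rw [hposf]
    simpa using hval 0 (Nat.zero_le _)
  rw [ha, hb]

-- ===== VERDICT (by name: the statement is the Claim_ definition above) =====
theorem minimumTotalDistance_spec : Claim_equal_minimumTotalDistance := by
  intro robot factory _ _
  unfold Spec_minimumTotalDistance
  exact pv_ports_eq robot factory
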